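-- pv_equiv track=rewrite | github.com/ttzz0035/Work | wiki_module/ui_app.py | normalize_tables
-- ===== SOURCE A (Python) =====
-- from typing import Dict, List, Optional
--
-- def is_table_row_line(line: str) -> bool:
--     s = (line or "").strip()
--     return bool(s and "|" in s)
--
-- def is_table_sep_line(line: str) -> bool:
--     s = (line or "").strip()
--     if not s or "|" not in s:
--         return False
--     t = s.replace("|", "").replace(":", "").replace("-", "").strip()
--     return t == "" and "-" in s
--
-- def normalize_tables(md: str) -> str:
--     if not md:
--         return ""
--
--     lines = md.splitlines()
--     out: List[str] = []
--     in_table = False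
--     saw_header = False
--     saw_sep = False
--
--     for i, line in enumerate(lines):
--         s = line.rstrip("\n")
--
--         if not in_table:
--             out.append(s)
--             if is_table_row_line(s):
--                 j = i + 1
--                 while j < len(lines) and lines[j].strip() == "":
--                     j += 1
--                 if j < len(lines) and is_table_sep_line(lines[j]):
--                     in_table = True
--                     saw_header = True
--                     saw_sep = False
--             continue
--
--         if s.strip() == "":
--             continue
--
--         if saw_header and not saw_sep:
--             if is_table_sep_line(s):
--                 saw_sep = True
--                 out.append(s)
--                 continue
--             in_table = False
--             saw_header = False
--             saw_sep = False
--             out.append(s)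
--             continue
--
--         if is_table_row_line(s):
--             out.append(s)
--             continue
--
--         in_table = False
--         saw_header = False
--         saw_sep = False
--         out.append(s)
--
--     return "\n".join(out)
-- ===== SOURCE B (Python) =====
-- # B: explicit index-pointer scan over the lines with an inner table-block loop
-- # instead of A's per-line boolean state machine; same output, different decomposition.
--
-- def is_table_row_line(line: str) -> bool:
--     s = (line or "").strip()
--     return bool(s and "|" in s)
--
-- def is_table_sep_line(line: str) -> bool:
--     s = (line or "").strip()
--     if not s or "|" not in s:
--         return False
--     t = s.replace("|", "").replace(":", "").replace("-", "").strip()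
--     return t == "" and "-" in s
--
-- def normalize_tables(md: str) -> str:
--     if not md:
--         return ""
--     lines = md.splitlines()
--     n = len(lines)
--     out = []
--     i = 0
--     while i < n:
--         line = lines[i]
--         out.append(line)
--         i += 1
--         if not is_table_row_line(line):
--             continue
--         j = i
--         while j < n and lines[j].strip() == "":
--             j += 1
--         if j >= n or not is_table_sep_line(lines[j]):
--             continue
--         # table block: header already emitted; blanks before the separator are dropped
--         out.append(lines[j])
--         i = j + 1
--         while i < n:
--             s = lines[i]
--             i += 1
--             if s.strip() == "":
--                 continue
--             if is_table_row_line(s):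
--                 out.append(s)
--                 continue
--             # first non-blank non-row line ends the block and is emitted verbatim
--             out.append(s)
--             break
--     return "\n".join(out)
-- ===== Notes on version B (the rewrite author's own statement) =====
-- stated objective: alternative
-- what changed: Replaced A's per-line boolean state machine (in_table/saw_header/saw_sep flags threaded through one for-loop) with an explicit index-pointer scan: an outer while-loop that emits lines and detects a table start by lookahead, and an inner table-consuming loop that emits the separator and row lines while dropping blanks.
import Mathlib
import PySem

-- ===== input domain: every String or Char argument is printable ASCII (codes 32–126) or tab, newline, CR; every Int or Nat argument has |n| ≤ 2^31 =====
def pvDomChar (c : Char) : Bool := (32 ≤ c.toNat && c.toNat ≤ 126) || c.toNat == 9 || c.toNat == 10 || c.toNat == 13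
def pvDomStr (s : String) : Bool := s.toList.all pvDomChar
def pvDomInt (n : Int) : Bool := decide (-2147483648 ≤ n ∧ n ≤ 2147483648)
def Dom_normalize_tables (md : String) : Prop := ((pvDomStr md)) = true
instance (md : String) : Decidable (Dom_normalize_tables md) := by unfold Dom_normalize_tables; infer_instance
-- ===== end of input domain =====

-- B re-implements A's per-line boolean state machine as an index-pointer scan with an
-- inner table-block loop (objective: alternative decomposition, same output).

-- ===== PORT A =====
-- shared module helpers (both Source A and Source B contain these same two functions)
def is_table_row_line (line : String) : Bool :=
  let s := PySem.Str.strip line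
  !(s == "") && PySem.Str.isIn "|" s

def is_table_sep_line (line : String) : Bool :=
  let s := PySem.Str.strip line
  if s == "" || !(PySem.Str.isIn "|" s) then false
  else
    let t := PySem.Str.strip (PySem.Str.replace (PySem.Str.replace (PySem.Str.replace s "|" "") ":" "") "-" "")
    t == "" && PySem.Str.isIn "-" s

-- `line.strip() == ""` (inlined in both Pythons)
def pyBlank (s : String) : Bool := PySem.Str.strip s == ""

-- exact hand port of `line.rstrip("\n")`: drop trailing '\n' characters only
def rstripNl (s : String) : String :=
  String.ofList ((s.toList.reverse.dropWhile (· == '\n')).reverse)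

-- A's lookahead: `j = i+1; while j < len(lines) and lines[j].strip() == "": j += 1`
def aSkip (lines : List String) (j : Nat) : Nat :=
  if h : j < lines.length then
    if pyBlank lines[j] then aSkip lines (j + 1) else j
  else j
termination_by lines.length - j

-- A's `for i, line in enumerate(lines)` loop, state = (out, in_table, saw_header, saw_sep)
def aLoop (lines : List String) : List String → Nat → List String → Bool → Bool → Bool → List String
  | [], _, out, _, _, _ => out
  | line :: rest, i, out, in_table, saw_header, saw_sep =>
    let s := rstripNl line
    if in_table = false then
      let out2 := out ++ [s]
      if is_table_row_line s then
        let j := aSkip lines (i + 1)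
        if j < lines.length && is_table_sep_line (lines.getD j "") then
          aLoop lines rest (i + 1) out2 true true false
        else
          aLoop lines rest (i + 1) out2 false saw_header saw_sep
      else
        aLoop lines rest (i + 1) out2 false saw_header saw_sep
    else if pyBlank s then
      aLoop lines rest (i + 1) out in_table saw_header saw_sep
    else if saw_header && !saw_sep then
      if is_table_sep_line s then
        aLoop lines rest (i + 1) (out ++ [s]) true true true
      else
        aLoop lines rest (i + 1) (out ++ [s]) false false false
    else if is_table_row_line s then
      aLoop lines rest (i + 1) (out ++ [s]) in_table saw_header saw_sep
    else
      aLoop lines rest (i + 1) (out ++ [s]) false false false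

def normalize_tables (md : String) : String :=
  if md == "" then ""
  else
    let lines := PySem.Str.splitlines md
    PySem.Str.join "\n" (aLoop lines lines 0 [] false false false)

-- ===== PORT B =====
-- B's blank-lookahead: `j = i; while j < n and lines[j].strip() == "": j += 1`
def bSkip (lines : List String) (j : Nat) : Nat :=
  if h : j < lines.length then
    if pyBlank lines[j] then bSkip lines (j + 1) else j
  else j
termination_by lines.length - j

-- needed by the termination argument of the mutual loops below
theorem bSkip_ge (lines : List String) (j : Nat) : j ≤ bSkip lines j := by
  induction j using bSkip.induct (lines := lines) with
  | case1 j h hb ih => rw [bSkip]; simp only [h, dif_pos, hb, if_pos]; omega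
  | case2 j h hb => rw [bSkip]; simp [h, hb]
  | case3 j h => rw [bSkip]; simp [h]

mutual
-- B's outer `while i < n` loop
def bOuter (lines : List String) (i : Nat) (out : List String) : List String :=
  if h : i < lines.length then
    let line := lines[i]
    let out2 := out ++ [line]
    if is_table_row_line line then
      let j := bSkip lines (i + 1)
      if hj : j < lines.length then
        if is_table_sep_line lines[j] then
          bRows lines (j + 1) (out2 ++ [lines[j]])
        else bOuter lines (i + 1) out2
      else bOuter lines (i + 1) out2
    else bOuter lines (i + 1) out2
  else out
termination_by (lines.length - i, 1)
decreasing_by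
  · have := bSkip_ge lines (i + 1); simp only [Prod.lex_def]; omega
  all_goals (simp only [Prod.lex_def]; omega)

-- B's inner table-block `while i < n` loop (rows and dropped blanks; exit line re-emitted)
def bRows (lines : List String) (i : Nat) (out : List String) : List String :=
  if h : i < lines.length then
    let s := lines[i]
    if pyBlank s then bRows lines (i + 1) out
    else if is_table_row_line s then bRows lines (i + 1) (out ++ [s])
    else bOuter lines (i + 1) (out ++ [s])
  else out
termination_by (lines.length - i, 0)
decreasing_by all_goals (simp only [Prod.lex_def]; omega)
end

def normalize_tables_alt (md : String) : String :=
  if md == "" then ""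
  else
    let lines := PySem.Str.splitlines md
    PySem.Str.join "\n" (bOuter lines 0 [])

-- ===== PRECONDITION & SPEC =====
def Spec_normalize_tables (md : String) (out : String) : Prop := out = normalize_tables_alt md
instance (md : String) (out : String) : Decidable (Spec_normalize_tables md out) := by unfold Spec_normalize_tables; infer_instance

-- ===== CLAIM (what is proved, stated in full; the proofs are below) =====
def Claim_equal_normalize_tables : Prop := ∀ (md : String), Dom_normalize_tables md → Spec_normalize_tables md (normalize_tables md)

-- ===== LEMMAS AND PROOFS =====

theorem aSkip_eq_bSkip (lines : List String) (j : Nat) : aSkip lines j = bSkip lines j := by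
  induction j using bSkip.induct (lines := lines) with
  | case1 j h hb ih => rw [aSkip, bSkip]; simp only [h, dif_pos, hb, if_pos]; exact ih
  | case2 j h hb => rw [aSkip, bSkip]; simp [h, hb]
  | case3 j h => rw [aSkip, bSkip]; simp [h]

theorem bSkip_le (lines : List String) (j : Nat) (hj : j ≤ lines.length) :
    bSkip lines j ≤ lines.length := by
  induction j using bSkip.induct (lines := lines) with
  | case1 j h hb ih => rw [bSkip]; simp only [h, dif_pos, hb, if_pos]; exact ih (by omega)
  | case2 j h hb => rw [bSkip]; simp [h, hb]; omega
  | case3 j h => rw [bSkip]; simp [h]; omega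

theorem bSkip_blanks (lines : List String) (j : Nat) :
    ∀ k (hk : k < lines.length), j ≤ k → k < bSkip lines j → pyBlank lines[k] = true := by
  induction j using bSkip.induct (lines := lines) with
  | case1 j h hb ih =>
    intro k hk h1 h2
    rcases Nat.eq_or_lt_of_le h1 with rfl | h1'
    · exact hb
    · rw [bSkip] at h2; simp only [h, dif_pos, hb, if_pos] at h2
      exact ih k hk h1' h2
  | case2 j h hb => intro k hk h1 h2; rw [bSkip] at h2; simp [h, hb] at h2; omega
  | case3 j h => intro k hk h1 h2; rw [bSkip] at h2; simp [h] at h2; omega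

theorem bSkip_stop (lines : List String) (j : Nat) :
    bSkip lines j < lines.length → pyBlank (lines.getD (bSkip lines j) "") = false := by
  induction j using bSkip.induct (lines := lines) with
  | case1 j hj hb ih =>
    intro h; rw [bSkip] at h ⊢; simp only [hj, dif_pos, hb, if_pos] at h ⊢; exact ih h
  | case2 j hj hb =>
    intro h; rw [bSkip]
    have hb' : pyBlank lines[j] = false := by simpa using hb
    simp [hj, hb', List.getD_eq_getElem lines "" hj]
  | case3 j hj => intro h; rw [bSkip] at h; simp [hj] at h

-- every line produced by splitlines contains no '\n'
theorem splitlines_go_no_nl (isB : Char → Bool) (hB : isB '\n' = true) :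
    ∀ (s cur acc : _), '\n' ∉ cur → (∀ l ∈ acc, '\n' ∉ l) →
      ∀ l ∈ PySem.Chars.splitlines.go isB s cur acc, '\n' ∉ l := by
  intro s cur acc
  induction s, cur, acc using PySem.Chars.splitlines.go.induct (isB := isB) with
  | case1 cur acc hc =>
    intro h1 h2 l hl
    simp only [PySem.Chars.splitlines.go, hc, if_pos, List.mem_reverse] at hl
    exact h2 l hl
  | case2 cur acc hc =>
    intro h1 h2 l hl
    simp only [PySem.Chars.splitlines.go, hc, List.mem_reverse, Bool.false_eq_true,
      if_false, List.mem_cons] at hl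
    rcases hl with rfl | hl
    · simpa using h1
    · exact h2 l hl
  | case3 rest cur acc ih =>
    intro h1 h2 l hl
    simp only [PySem.Chars.splitlines.go] at hl
    refine ih (by simp) ?_ l hl
    intro l' hl'
    rcases List.mem_cons.mp hl' with rfl | hl'
    · simpa using h1
    · exact h2 l' hl'
  | case4 c rest cur acc hne hc ih =>
    intro h1 h2 l hl
    rw [PySem.Chars.splitlines.go.eq_3 isB cur acc c rest hne] at hl
    simp only [hc, if_pos] at hl
    refine ih (by simp) ?_ l hl
    intro l' hl'
    rcases List.mem_cons.mp hl' with rfl | hl'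
    · simpa using h1
    · exact h2 l' hl'
  | case5 c rest cur acc hne hc ih =>
    intro h1 h2 l hl
    rw [PySem.Chars.splitlines.go.eq_3 isB cur acc c rest hne] at hl
    simp only [hc, Bool.false_eq_true, if_false] at hl
    refine ih ?_ h2 l hl
    intro hmem
    rcases List.mem_cons.mp hmem with rfl | hmem
    · exact hc hB
    · exact h1 hmem

theorem splitlines_no_nl (md : String) :
    ∀ l ∈ PySem.Str.splitlines md, '\n' ∉ l.toList := by
  intro l hl
  have hmem : l.toList ∈ PySem.Chars.splitlines md.toList := by
    rw [← PySem.Str.splitlines_map_toList]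
    exact List.mem_map_of_mem hl
  unfold PySem.Chars.splitlines at hmem
  exact splitlines_go_no_nl _ (by decide) _ _ _ (by simp) (by simp) _ hmem

theorem rstripNl_eq (l : String) (h : '\n' ∉ l.toList) : rstripNl l = l := by
  unfold rstripNl
  have : l.toList.reverse.dropWhile (· == '\n') = l.toList.reverse := by
    cases hc : l.toList.reverse with
    | nil => simp
    | cons a t =>
      have ha : a ∈ l.toList := by
        have : a ∈ l.toList.reverse := by rw [hc]; exact List.mem_cons_self
        simpa using this
      have hne : (a == '\n') = false := by
        simp only [beq_eq_false_iff_ne, ne_eq]; rintro rfl; exact h ha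
      rw [List.dropWhile_cons, hne]; simp
  rw [this]; simp

-- A's state machine, started in the in-table state, ignores blank lines: it can be
-- fast-forwarded over a blank segment
theorem aLoop_blanks (lines : List String) (sh ss : Bool)
    (HN : ∀ k (hk : k < lines.length), rstripNl lines[k] = lines[k]) :
    ∀ d i j out, i ≤ j → j ≤ lines.length → j - i = d →
    (∀ k (hk : k < lines.length), i ≤ k → k < j → pyBlank lines[k] = true) →
    aLoop lines (lines.drop i) i out true sh ss = aLoop lines (lines.drop j) j out true sh ss := by
  intro d
  induction d with
  | zero =>
    intro i j out h1 h2 h3 h4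
    have : i = j := by omega
    subst this; rfl
  | succ d ihd =>
    intro i j out h1 h2 h3 h4
    have hij : i < j := by omega
    have hil : i < lines.length := by omega
    rw [List.drop_eq_getElem_cons hil]
    simp only [aLoop, HN i hil, h4 i hil (le_refl i) hij, Bool.true_eq_false, if_false, if_true,
      reduceIte]
    exact ihd (i + 1) j out (by omega) h2 (by omega) (fun k hk hk1 hk2 => h4 k hk (by omega) hk2)

-- the central simulation: A's fold from index i in the NotIn state is B's outer loop,
-- and in the Rows state it is B's inner loop
theorem main_sim (lines : List String)
    (HN : ∀ k (hk : k < lines.length), rstripNl lines[k] = lines[k]) :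
    ∀ n i, lines.length - i = n → i ≤ lines.length →
      (∀ out sh ss, aLoop lines (lines.drop i) i out false sh ss = bOuter lines i out) ∧
      (∀ out, aLoop lines (lines.drop i) i out true true true = bRows lines i out) := by
  intro n
  induction n using Nat.strong_induction_on with
  | _ n ih =>
    intro i hni hile
    by_cases hi : i < lines.length
    · constructor
      · intro out sh ss
        rw [List.drop_eq_getElem_cons hi, bOuter]
        simp only [hi, dif_pos, HN i hi, aLoop]
        by_cases hrow : is_table_row_line lines[i] = true
        · simp only [hrow, if_true, aSkip_eq_bSkip]
          have hjge : i + 1 ≤ bSkip lines (i + 1) := bSkip_ge lines (i + 1)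
          have hjle : bSkip lines (i + 1) ≤ lines.length := bSkip_le lines (i + 1) (by omega)
          by_cases hlt : bSkip lines (i + 1) < lines.length
          · rw [List.getD_eq_getElem lines "" hlt]
            by_cases hsep : is_table_sep_line lines[bSkip lines (i + 1)] = true
            · simp only [hlt, hsep, decide_true, Bool.and_true, Bool.true_and, if_true, dif_pos,
                decide_eq_true_eq]
              rw [aLoop_blanks lines true false HN (bSkip lines (i + 1) - (i + 1)) (i + 1)
                (bSkip lines (i + 1)) (out ++ [lines[i]]) (by omega) hjle (by omega)
                (fun k hk hk1 hk2 => bSkip_blanks lines (i + 1) k hk hk1 hk2)]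
              rw [List.drop_eq_getElem_cons hlt]
              have hnb : pyBlank lines[bSkip lines (i + 1)] = false := by
                have := bSkip_stop lines (i + 1) hlt
                rwa [List.getD_eq_getElem lines "" hlt] at this
              simp only [aLoop, HN _ hlt, hnb, hsep, Bool.true_eq_false, if_false, if_true,
                Bool.false_eq_true, Bool.and_true, Bool.true_and, Bool.not_false, reduceIte]
              exact (ih (lines.length - (bSkip lines (i + 1) + 1)) (by omega)
                (bSkip lines (i + 1) + 1) rfl (by omega)).2 (out ++ [lines[i]] ++ [lines[bSkip lines (i + 1)]])
            · simp only [hlt, hsep, decide_true, decide_eq_true_eq, Bool.and_eq_true, if_neg,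
                not_and, Bool.true_and, Bool.false_eq_true, and_false, if_false, dif_pos, reduceIte]
              exact (ih (lines.length - (i + 1)) (by omega) (i + 1) rfl (by omega)).1
                (out ++ [lines[i]]) sh ss
          · have hge : ¬ bSkip lines (i + 1) < lines.length := hlt
            simp only [hlt, decide_false, Bool.false_and, Bool.false_eq_true, if_false, dif_neg,
              hge, reduceIte, decide_eq_true_eq, false_and]
            exact (ih (lines.length - (i + 1)) (by omega) (i + 1) rfl (by omega)).1
              (out ++ [lines[i]]) sh ss
        · simp only [hrow, Bool.false_eq_true, if_false, reduceIte]
          exact (ih (lines.length - (i + 1)) (by omega) (i + 1) rfl (by omega)).1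
            (out ++ [lines[i]]) sh ss
      · intro out
        rw [List.drop_eq_getElem_cons hi, bRows]
        simp only [hi, dif_pos, HN i hi, aLoop]
        by_cases hb : pyBlank lines[i] = true
        · simp only [hb, if_true, Bool.true_eq_false, if_false, reduceIte]
          exact (ih (lines.length - (i + 1)) (by omega) (i + 1) rfl (by omega)).2 out
        · by_cases hrow : is_table_row_line lines[i] = true
          · simp only [hb, hrow, Bool.true_eq_false, Bool.not_true, Bool.and_false, if_true,
              Bool.false_eq_true, if_false, reduceIte]
            exact (ih (lines.length - (i + 1)) (by omega) (i + 1) rfl (by omega)).2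
              (out ++ [lines[i]])
          · simp only [hb, hrow, Bool.true_eq_false, Bool.not_true, Bool.and_false,
              Bool.false_eq_true, if_false, reduceIte]
            exact (ih (lines.length - (i + 1)) (by omega) (i + 1) rfl (by omega)).1
              (out ++ [lines[i]]) false false
    · have hieq : i = lines.length := by omega
      subst hieq
      refine ⟨fun out sh ss => ?_, fun out => ?_⟩
      · rw [bOuter]; simp [List.drop_length, aLoop]
      · rw [bRows]; simp [List.drop_length, aLoop]

-- ===== VERDICT (by name: the statement is the Claim_ definition above) =====
theorem normalize_tables_spec : Claim_equal_normalize_tables := by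
  intro md _
  unfold Spec_normalize_tables normalize_tables normalize_tables_alt
  by_cases hmd : md == ""
  · simp [hmd]
  · simp only [hmd, if_neg, Bool.false_eq_true]
    have HN : ∀ k (hk : k < (PySem.Str.splitlines md).length),
        rstripNl (PySem.Str.splitlines md)[k] = (PySem.Str.splitlines md)[k] := by
      intro k hk
      exact rstripNl_eq _ (splitlines_no_nl md _ (List.getElem_mem hk))
    have := (main_sim (PySem.Str.splitlines md) HN _ 0 rfl (Nat.zero_le _)).1 [] false false
    rw [List.drop_zero] at this
    rw [this]
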